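-- pv_equiv track=rewrite | github.com/Chang-Chia-Chi/TrackNet-Badminton-Tracking-tensorflow2 | utils.py | check_steps
-- ===== SOURCE A (Python) =====
-- from functools import reduce
-- from collections import defaultdict
--
-- def check_steps(img_paths, batch_size, frame_stack):
--     """
--     Compute how many steps required for an training epoch
--
--     param:
--     img_paths --> list of image path
--     batch_size --> batch size
--     frame_stack --> number of frames to stack for one input
--     """
--     frame_counts = defaultdict(lambda: 0)
--     for path in img_paths:
--         video_name = reduce(lambda x, y:x+y, path.split('_')[:-1])
--         frame_counts[video_name] += 1
--
--     n_steps = 0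
--     for count in frame_counts.values():
--         n_steps += (count - (frame_stack-1))//batch_size
--
--     return n_steps - 1
-- ===== SOURCE B (Python) =====
-- from functools import reduce
--
-- def check_steps(img_paths, batch_size, frame_stack):
--     # sort-based grouping: sort the video keys, then scan contiguous runs
--     keys = sorted(reduce(lambda x, y: x + y, p.split('_')[:-1]) for p in img_paths)
--     n = len(keys)
--     total = -1
--     i = 0
--     while i < n:
--         j = i + 1
--         while j < n and keys[j] == keys[i]:
--             j += 1
--         total += ((j - i) - (frame_stack - 1)) // batch_size
--         i = j
--     return total
-- ===== Notes on version B (the rewrite author's own statement) =====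
-- stated objective: alternative
-- what changed: Replaces A's defaultdict tally of per-video frame counts with sort-based grouping: the video keys are sorted and contiguous runs of equal keys are scanned to get each group's count.
import Mathlib
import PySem

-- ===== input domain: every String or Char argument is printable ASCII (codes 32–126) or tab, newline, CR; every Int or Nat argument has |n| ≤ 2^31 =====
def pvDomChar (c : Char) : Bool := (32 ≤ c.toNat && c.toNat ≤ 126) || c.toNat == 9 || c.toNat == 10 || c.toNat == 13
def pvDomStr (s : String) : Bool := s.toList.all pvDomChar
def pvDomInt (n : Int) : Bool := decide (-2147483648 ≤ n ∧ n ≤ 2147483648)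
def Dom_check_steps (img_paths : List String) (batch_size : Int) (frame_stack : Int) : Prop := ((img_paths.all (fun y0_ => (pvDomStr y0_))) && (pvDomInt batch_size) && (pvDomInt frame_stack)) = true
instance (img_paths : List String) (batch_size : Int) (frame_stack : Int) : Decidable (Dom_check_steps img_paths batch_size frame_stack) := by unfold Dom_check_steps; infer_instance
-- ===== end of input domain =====

-- B replaces A's defaultdict tally with sort-then-scan over contiguous runs of equal keys (alternative algorithm, same result).

-- ===== PORT A =====
-- video_name = reduce(lambda x, y: x + y, path.split('_')[:-1]); on the Char-list side
-- (the [] case is Python's TypeError on an empty reduce, excluded by Pre_)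
def pvKey (p : String) : List Char :=
  match (PySem.Chars.splitOn p.toList ['_']).dropLast with
  | [] => []
  | h :: t => t.foldl (fun x y => x ++ y) h

def check_steps (img_paths : List String) (batch_size : Int) (frame_stack : Int) : Int :=
  let frame_counts : PySem.Dict (List Char) Int :=
    img_paths.foldl (fun d path => d.modify (pvKey path) 0 (· + 1)) PySem.Dict.empty
  let n_steps : Int :=
    frame_counts.values.foldl
      (fun acc count => acc + PySem.Int.floordiv (count - (frame_stack - 1)) batch_size) 0
  n_steps - 1

-- ===== PORT B =====
-- the run-scan over the sorted key list (the two while loops of Source B)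
def pvRunSum (batch_size frame_stack : Int) : List (List Char) → Int
  | [] => 0
  | h :: t =>
      PySem.Int.floordiv ((((t.takeWhile (· == h)).length + 1 : Nat) : Int) - (frame_stack - 1)) batch_size
        + pvRunSum batch_size frame_stack (t.dropWhile (· == h))
termination_by l => l.length
decreasing_by
  exact Nat.lt_succ_of_le (List.length_dropWhile_le _ _)

def check_steps_alt (img_paths : List String) (batch_size : Int) (frame_stack : Int) : Int :=
  let keys := PySem.List.sorted (img_paths.map pvKey) (fun k => k) false;
  -1 + pvRunSum batch_size frame_stack keys

-- ===== PRECONDITION & SPEC =====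
-- Pre_ excludes exactly the inputs where Python A raises: a path without '_' (reduce over an
-- empty list raises TypeError) and batch_size = 0 with a nonempty path list (ZeroDivisionError);
-- B raises on the same inputs.
def Pre_check_steps (img_paths : List String) (batch_size : Int) (frame_stack : Int) : Prop :=
  (∀ p ∈ img_paths, '_' ∈ p.toList) ∧ (img_paths = [] ∨ batch_size ≠ 0)
instance (img_paths : List String) (batch_size : Int) (frame_stack : Int) : Decidable (Pre_check_steps img_paths batch_size frame_stack) := by unfold Pre_check_steps; infer_instance

def pvWitness_check_steps : List String × Int × Int := (["v1_003.jpg", "v1_004.jpg", "v2_001.jpg"], 1, 1)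

def Spec_check_steps (img_paths : List String) (batch_size : Int) (frame_stack : Int) (out : Int) : Prop := out = check_steps_alt img_paths batch_size frame_stack
instance (img_paths : List String) (batch_size : Int) (frame_stack : Int) (out : Int) : Decidable (Spec_check_steps img_paths batch_size frame_stack out) := by unfold Spec_check_steps; infer_instance

-- ===== CLAIM (what is proved, stated in full; the proofs are below) =====
def Claim_equal_check_steps : Prop := ∀ (img_paths : List String) (batch_size : Int) (frame_stack : Int), Dom_check_steps img_paths batch_size frame_stack → Pre_check_steps img_paths batch_size frame_stack → Spec_check_steps img_paths batch_size frame_stack (check_steps img_paths batch_size frame_stack)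

-- ===== LEMMAS AND PROOFS =====

-- the per-group step count
def pvF (batch_size frame_stack : Int) (c : Nat) : Int :=
  PySem.Int.floordiv ((c : Int) - (frame_stack - 1)) batch_size

-- A as a sum over the distinct keys (first-occurrence order) of pvF of the multiplicity
lemma pvA_char (img_paths : List String) (bs fs : Int) :
    check_steps img_paths bs fs =
      ((PySem.Set.ofList (img_paths.map pvKey)).map
        (fun k => pvF bs fs ((img_paths.map pvKey).count k))).sum - 1 := by
  simp only [check_steps]
  rw [← List.foldl_map (f := pvKey) (g := fun d x => PySem.Dict.modify d x 0 (· + 1)),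
    ← PySem.Dict.counter_eq_foldl,
    PySem.List.foldl_add (g := fun c => PySem.Int.floordiv (c - (fs - 1)) bs)]
  simp [PySem.Dict.values, PySem.Dict.items_counter, List.map_map, pvF, Function.comp_def]

-- the run-scan over a ≤-sorted list is the same sum over its distinct keys
lemma pvRunSum_char (bs fs : Int) :
    ∀ (s : List (List Char)), List.Pairwise (· ≤ ·) s →
      pvRunSum bs fs s =
        ((PySem.Set.ofList s).map (fun k => pvF bs fs (s.count k))).sum := by
  suffices H : ∀ (n : Nat) (s : List (List Char)), s.length ≤ n → List.Pairwise (· ≤ ·) s →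
      pvRunSum bs fs s =
        ((PySem.Set.ofList s).map (fun k => pvF bs fs (s.count k))).sum by
    exact fun s hs => H s.length s le_rfl hs
  intro n
  induction n with
  | zero =>
    intro s hlen _
    have : s = [] := List.length_eq_zero_iff.mp (Nat.le_zero.mp hlen)
    subst this
    simp [pvRunSum, PySem.Set.ofList]
  | succ n ih =>
    intro s hlen hp
    match s with
    | [] => simp [pvRunSum, PySem.Set.ofList]
    | h :: t =>
      have hcons := List.pairwise_cons.mp hp
      have hle : ∀ y ∈ t, h ≤ y := hcons.1
      have hpt : List.Pairwise (· ≤ ·) t := hcons.2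
      -- run and rest
      have hrun : ∀ x ∈ t.takeWhile (· == h), x = h := by
        intro x hx
        exact eq_of_beq (List.mem_takeWhile_imp (p := fun x => x == h) hx)
      have hsplit : t.takeWhile (· == h) ++ t.dropWhile (· == h) = t :=
        List.takeWhile_append_dropWhile
      have hprest : List.Pairwise (· ≤ ·) (t.dropWhile (· == h)) :=
        hpt.sublist (List.dropWhile_sublist _)
      have hnotin : h ∉ t.dropWhile (· == h) := by
        intro hmem
        cases hrest : t.dropWhile (· == h) with
        | nil => rw [hrest] at hmem; cases hmem
        | cons r rs =>
          have hrf : (r == h) = false := by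
            have := List.head_dropWhile_not (· == h) (l := t) (by simp [hrest])
            simpa [hrest] using this
          have hrneh : r ≠ h := by
            intro he; rw [he] at hrf; simp at hrf
          rw [hrest] at hmem
          rcases List.mem_cons.mp hmem with he | hmem'
          · exact hrneh he.symm
          · -- r ≤ h from pairwise rest, h ≤ r since r ∈ t
            have h1 : r ≤ h := by
              have := List.pairwise_cons.mp (hrest ▸ hprest)
              exact this.1 h hmem'
            have h2 : h ≤ r := hle r ((List.dropWhile_sublist _).subset (by rw [hrest]; exact List.mem_cons_self))
            exact hrneh (le_antisymm h1 h2)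
      -- counts
      have hcount_run : (t.takeWhile (· == h)).count h = (t.takeWhile (· == h)).length :=
        List.count_eq_length.mpr (fun b hb => (hrun b hb).symm)
      have hct : List.count h t = (t.takeWhile (· == h)).length := by
        conv_lhs => rw [← hsplit]
        rw [List.count_append, hcount_run, List.count_eq_zero.mpr hnotin, Nat.add_zero]
      have hcount_h : (h :: t).count h = (t.takeWhile (· == h)).length + 1 := by
        rw [List.count_cons_self, hct]
      have hcount_ne : ∀ k, k ≠ h → (h :: t).count k = (t.dropWhile (· == h)).count k := by
        intro k hk
        have hct' : List.count k t = List.count k (t.dropWhile (· == h)) := by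
          conv_lhs => rw [← hsplit]
          rw [List.count_append, List.count_eq_zero.mpr (fun hm => hk (hrun k hm)), Nat.zero_add]
        rw [← hct']
        simp [Ne.symm hk]
      -- the distinct keys permute
      have hnodup2 : (h :: PySem.Set.ofList (t.dropWhile (· == h))).Nodup := by
        refine List.nodup_cons.mpr ⟨?_, PySem.Set.nodup_ofList _⟩
        intro hm
        exact hnotin ((PySem.Set.mem_ofList _ _).mp hm)
      have hperm : (PySem.Set.ofList (h :: t)).Perm (h :: PySem.Set.ofList (t.dropWhile (· == h))) := by
        refine (List.perm_ext_iff_of_nodup (PySem.Set.nodup_ofList _) hnodup2).mpr ?_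
        intro x
        simp only [PySem.Set.mem_ofList, List.mem_cons]
        constructor
        · rintro (he | hx)
          · exact Or.inl he
          · rw [← hsplit] at hx
            rcases List.mem_append.mp hx with hx | hx
            · exact Or.inl (hrun x hx)
            · exact Or.inr hx
        · rintro (he | hx)
          · exact Or.inl he
          · exact Or.inr ((List.dropWhile_sublist _).subset hx)
      -- put it together
      rw [pvRunSum]
      rw [List.Perm.sum_eq (List.Perm.map _ hperm)]
      rw [List.map_cons, List.sum_cons]
      have hstep : ∀ k ∈ PySem.Set.ofList (t.dropWhile (· == h)),
          pvF bs fs ((h :: t).count k) = pvF bs fs ((t.dropWhile (· == h)).count k) := by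
        intro k hk
        have : k ≠ h := by
          intro he
          exact hnotin (he ▸ (PySem.Set.mem_ofList (t.dropWhile (· == h)) k).mp hk)
        rw [hcount_ne k this]
      rw [List.map_congr_left hstep]
      rw [← ih (t.dropWhile (· == h))
        (le_trans (List.length_dropWhile_le _ _) (Nat.le_of_succ_le_succ hlen)) hprest]
      rw [hcount_h]
      simp [pvF]

-- ===== VERDICT (by name: the statement is the Claim_ definition above) =====
theorem check_steps_spec : Claim_equal_check_steps := by
  intro img_paths bs fs _ _
  simp only [Spec_check_steps, check_steps_alt]
  rw [pvA_char]
  have hpair : List.Pairwise (· ≤ ·) (PySem.List.sorted (List.map pvKey img_paths) (fun k : List Char => k) false) := by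
    have h := PySem.List.sorted_pairwise (κ := List Char) (List.map pvKey img_paths) (fun k => k)
    have he : PySem.List.sorted (List.map pvKey img_paths) (fun k : List Char => k) false
        = @PySem.List.sorted (List Char) (List Char) _ LinearOrder.toDecidableLT (List.map pvKey img_paths) (fun k => k) false := by
      congr 1
    rw [he]
    exact h
  rw [pvRunSum_char bs fs _ hpair]
  have hperm : (PySem.List.sorted (img_paths.map pvKey) (fun k => k) false).Perm (img_paths.map pvKey) :=
    PySem.List.sorted_perm _ _ _
  have hperm2 : (PySem.Set.ofList (PySem.List.sorted (img_paths.map pvKey) (fun k => k) false)).Perm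
      (PySem.Set.ofList (img_paths.map pvKey)) := by
    refine (List.perm_ext_iff_of_nodup (PySem.Set.nodup_ofList _) (PySem.Set.nodup_ofList _)).mpr ?_
    intro x
    rw [PySem.Set.mem_ofList, PySem.Set.mem_ofList, hperm.mem_iff]
  have hsum : ((PySem.Set.ofList (PySem.List.sorted (List.map pvKey img_paths) (fun k : List Char => k) false)).map
        (fun k => pvF bs fs ((PySem.List.sorted (List.map pvKey img_paths) (fun k : List Char => k) false).count k))).sum
      = ((PySem.Set.ofList (List.map pvKey img_paths)).map
        (fun k => pvF bs fs ((List.map pvKey img_paths).count k))).sum := by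
    rw [List.map_congr_left (fun k _ => by rw [hperm.count_eq k])]
    exact List.Perm.sum_eq (hperm2.map _)
  rw [hsum]
  ring
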